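-- pv_equiv track=rewrite | github.com/h0ngc/PS-TTS | inference_en_to_kr.py | find_vowel_ranges
-- ===== SOURCE A (Python) =====
-- def find_vowel_ranges(kr_list, vowel):
--     ranges = []
--     start = None
--
--     for i, value in enumerate(kr_list):
--         if value == vowel and start is None:
--             start = i
--         elif value != vowel and start is not None:
--             ranges.append((start, i - 1))
--             start = None
--
--     if start is not None:
--         ranges.append((start, len(kr_list) - 1))
--
--     return ranges
-- ===== SOURCE B (Python) =====
-- from itertools import groupby
--
--
-- def find_vowel_ranges(kr_list, vowel):
--     ranges = []
--     start = 0
--     for key, grp in groupby(kr_list):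
--         n = sum(1 for _ in grp)
--         if key == vowel:
--             ranges.append((start, start + n - 1))
--         start += n
--     return ranges
-- ===== Notes on version B (the rewrite author's own statement) =====
-- stated objective: idiomatic
-- what changed: Replaces the sentinel-based transition-detection scan (Optional start plus a trailing-run cleanup after the loop) with itertools.groupby: the list is split into maximal runs, and a running start index plus run length yields each range directly, with no post-loop fixup.
import Mathlib
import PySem

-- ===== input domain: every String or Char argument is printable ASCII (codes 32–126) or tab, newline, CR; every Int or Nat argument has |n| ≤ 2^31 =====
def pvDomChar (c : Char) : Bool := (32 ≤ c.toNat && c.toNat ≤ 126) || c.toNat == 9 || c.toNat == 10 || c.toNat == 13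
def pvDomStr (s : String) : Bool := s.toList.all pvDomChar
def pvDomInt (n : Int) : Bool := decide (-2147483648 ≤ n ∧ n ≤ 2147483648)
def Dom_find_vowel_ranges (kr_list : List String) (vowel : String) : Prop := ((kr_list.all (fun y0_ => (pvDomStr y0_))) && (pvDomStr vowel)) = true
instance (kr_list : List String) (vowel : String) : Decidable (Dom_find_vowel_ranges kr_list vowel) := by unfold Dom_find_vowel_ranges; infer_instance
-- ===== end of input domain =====

-- B re-implements A via run-length grouping (itertools.groupby) instead of a
-- sentinel-based transition scan with a trailing-run cleanup; same observable behaviour.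

-- ===== PORT A =====
-- state: (ranges, start, i); the Int counter i transcribes 'enumerate'
def stepA (vowel : String) (st : List (Int × Int) × Option Int × Int) (value : String) :
    List (Int × Int) × Option Int × Int :=
  let (ranges, start, i) := st
  match start with
  | none => if value = vowel then (ranges, some i, i + 1) else (ranges, none, i + 1)
  | some s =>
      if value ≠ vowel then (ranges ++ [(s, i - 1)], none, i + 1)
      else (ranges, some s, i + 1)

def find_vowel_ranges (kr_list : List String) (vowel : String) : List (Int × Int) :=
  let st := kr_list.foldl (stepA vowel) ([], none, 0)
  match st.2.1 with
  | some s => st.1 ++ [(s, (kr_list.length : Int) - 1)]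
  | none => st.1

-- ===== PORT B =====
-- run-length grouping: Lean counterpart of itertools.groupby + counting each group
def rle : List String → List (String × Int)
  | [] => []
  | x :: xs =>
      (x, 1 + ((xs.takeWhile (· == x)).length : Int)) :: rle (xs.dropWhile (· == x))
termination_by xs => xs.length
decreasing_by simpa using Nat.lt_succ_of_le (List.length_dropWhile_le _ _)

def stepB (vowel : String) (st : List (Int × Int) × Int) (kn : String × Int) :
    List (Int × Int) × Int :=
  let (ranges, start) := st
  let (k, n) := kn
  ((if k = vowel then ranges ++ [(start, start + n - 1)] else ranges), start + n)

def find_vowel_ranges_alt (kr_list : List String) (vowel : String) : List (Int × Int) :=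
  ((rle kr_list).foldl (stepB vowel) ([], 0)).1

-- ===== PRECONDITION & SPEC =====
def Spec_find_vowel_ranges (kr_list : List String) (vowel : String) (out : List (Int × Int)) : Prop := out = find_vowel_ranges_alt kr_list vowel
instance (kr_list : List String) (vowel : String) (out : List (Int × Int)) : Decidable (Spec_find_vowel_ranges kr_list vowel out) := by unfold Spec_find_vowel_ranges; infer_instance

-- ===== CLAIM (what is proved, stated in full; the proofs are below) =====
def Claim_equal_find_vowel_ranges : Prop := ∀ (kr_list : List String) (vowel : String), Dom_find_vowel_ranges kr_list vowel → Spec_find_vowel_ranges kr_list vowel (find_vowel_ranges kr_list vowel)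

-- ===== LEMMAS AND PROOFS =====

-- A's full computation started at counter i with accumulator acc (incl. the trailing fix)
def afull (v : String) (i : Int) (xs : List String) (acc : List (Int × Int)) : List (Int × Int) :=
  let st := xs.foldl (stepA v) (acc, none, i)
  match st.2.1 with
  | some s => st.1 ++ [(s, i + (xs.length : Int) - 1)]
  | none => st.1

theorem foldA_run_ne (v : String) (run : List String) (h : ∀ y ∈ run, y ≠ v)
    (acc : List (Int × Int)) (i : Int) :
    run.foldl (stepA v) (acc, none, i) = (acc, none, i + run.length) := by
  induction run generalizing i with
  | nil => simp
  | cons x t ih =>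
      have hx : x ≠ v := h x (by simp)
      simp only [List.foldl_cons, stepA, if_neg hx]
      rw [ih (fun y hy => h y (by simp [hy]))]
      simp; omega

theorem foldA_run_eq (v : String) (run : List String) (h : ∀ y ∈ run, y = v)
    (acc : List (Int × Int)) (s i : Int) :
    run.foldl (stepA v) (acc, some s, i) = (acc, some s, i + run.length) := by
  induction run generalizing i with
  | nil => simp
  | cons x t ih =>
      have hx : x = v := h x (by simp)
      simp only [List.foldl_cons, stepA, hx, ne_eq, not_true_eq_false, ite_false]
      rw [ih (fun y hy => h y (by simp [hy]))]
      simp; omega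

theorem foldA_close (v : String) (y : String) (t : List String) (hy : y ≠ v)
    (acc : List (Int × Int)) (s i : Int) :
    (y :: t).foldl (stepA v) (acc, some s, i)
      = (y :: t).foldl (stepA v) (acc ++ [(s, i - 1)], none, i) := by
  simp [List.foldl_cons, stepA, hy]

theorem dropWhile_head_false {α : Type} (p : α → Bool) (l : List α) {y : α} {t2 : List α}
    (h : l.dropWhile p = y :: t2) : p y = false := by
  induction l with
  | nil => simp at h
  | cons a l ih =>
      by_cases hp : p a
      · rw [List.dropWhile_cons, if_pos hp] at h; exact ih h
      · rw [List.dropWhile_cons, if_neg hp] at h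
        cases h; simpa using hp

theorem main_lemma (v : String) (xs : List String) (i : Int) (acc : List (Int × Int)) :
    afull v i xs acc = ((rle xs).foldl (stepB v) (acc, i)).1 := by
  match xs with
  | [] => simp [afull, rle]
  | x :: t =>
      have hsplit : t.takeWhile (· == x) ++ t.dropWhile (· == x) = t :=
        List.takeWhile_append_dropWhile
      set run := t.takeWhile (· == x) with hrun
      set rest := t.dropWhile (· == x) with hrest
      have hlenrest : rest.length ≤ t.length := List.length_dropWhile_le _ _
      have hlen : (x :: t).length = 1 + run.length + rest.length := by
        have := congrArg List.length hsplit
        simp at this; simp; omega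
      have hrle : rle (x :: t) = (x, 1 + (run.length : Int)) :: rle rest := by
        rw [rle]
      by_cases hx : x = v
      · -- opening (or continuing into) a vowel run
        have hrunv : ∀ y ∈ run, y = v := by
          intro y hy
          have hb := List.mem_takeWhile_imp (show y ∈ List.takeWhile (· == x) t from hrun ▸ hy)
          have hyx : y = x := by simpa using hb
          rw [hyx, hx]
        have step1 : (x :: t).foldl (stepA v) (acc, none, i)
            = rest.foldl (stepA v) (acc, some i, i + 1 + run.length) := by
          simp only [List.foldl_cons, stepA, if_pos hx]
          rw [← hsplit, List.foldl_append, foldA_run_eq v run hrunv]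
        match hr : rest with
        | [] =>
            have ht : t = run := by simpa using hsplit.symm
            simp only [afull, step1, List.foldl_nil, hrle]
            simp [stepB, if_pos hx, rle, ht]
            omega
        | y :: t2 =>
            have hd : List.dropWhile (· == x) t = y :: t2 := hrest.symm
            have hy := dropWhile_head_false (· == x) t hd
            have hyv : y ≠ v := by simp at hy; rw [← hx]; exact hy
            have step2 : (x :: t).foldl (stepA v) (acc, none, i)
                = (y :: t2).foldl (stepA v)
                    (acc ++ [(i, (i + 1 + run.length) - 1)], none, i + 1 + run.length) := by
              rw [step1, foldA_close v y t2 hyv]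
            have hAfull : afull v i (x :: t) acc
                = afull v (i + 1 + run.length) (y :: t2) (acc ++ [(i, i + run.length)]) := by
              simp only [afull, step2]
              have : (i + 1 + (run.length : Int)) - 1 = i + run.length := by omega
              rw [this]
              have hb : i + ((x :: t).length : Int) - 1
                  = (i + 1 + run.length) + ((y :: t2).length : Int) - 1 := by
                rw [hlen]; rw [hr] at *; push_cast; ring
              rw [hb]
            rw [hAfull, ← hr, main_lemma v rest, hrle]
            simp only [List.foldl_cons, stepB, if_pos hx, hr]
            have h1 : i + (1 + (run.length : Int)) - 1 = i + run.length := by omega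
            have h2 : i + (1 + (run.length : Int)) = i + 1 + run.length := by omega
            rw [h1, h2]
      · -- a non-vowel run
        have hrunv : ∀ y ∈ run, y ≠ v := by
          intro y hy
          have hb := List.mem_takeWhile_imp (show y ∈ List.takeWhile (· == x) t from hrun ▸ hy)
          have hyx : y = x := by simpa using hb
          rw [hyx]; exact hx
        have step1 : (x :: t).foldl (stepA v) (acc, none, i)
            = rest.foldl (stepA v) (acc, none, i + 1 + run.length) := by
          simp only [List.foldl_cons, stepA, if_neg hx]
          rw [← hsplit, List.foldl_append, foldA_run_ne v run hrunv]
        have hAfull : afull v i (x :: t) acc = afull v (i + 1 + run.length) rest acc := by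
          simp only [afull, step1]
          have hb : i + ((x :: t).length : Int) - 1
              = (i + 1 + run.length) + (rest.length : Int) - 1 := by
            rw [hlen]; push_cast; ring
          rw [hb]
        rw [hAfull, main_lemma v rest, hrle]
        simp only [List.foldl_cons, stepB, if_neg hx]
        have h2 : i + (1 + (run.length : Int)) = i + 1 + run.length := by omega
        rw [h2]
termination_by xs.length
decreasing_by all_goals simpa using Nat.lt_succ_of_le (List.length_dropWhile_le _ _)

-- ===== VERDICT (by name: the statement is the Claim_ definition above) =====
theorem find_vowel_ranges_spec : Claim_equal_find_vowel_ranges := by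
  intro kr_list vowel _
  unfold Spec_find_vowel_ranges find_vowel_ranges find_vowel_ranges_alt
  have := main_lemma vowel kr_list 0 []
  simp only [afull] at this
  rw [← this]
  have h0 : (0 : Int) + (kr_list.length : Int) - 1 = (kr_list.length : Int) - 1 := by omega
  rw [h0]
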